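-- pv_equiv track=rewrite | github.com/SammyDMartin/CTL | CTL03.py | generate_transitions
-- ===== SOURCE A (Python) =====
-- from copy import deepcopy
--
-- def generate_transitions(structure_string, grammar,allkernels):
--     """
--     Used in CTL03 and CTL04 to generate the transition counts from a structure string, relying on the fact that the grammar
--     has no ambiguity. Returns dictionary of transition counts
--     """
--     started,finished = False,False
--
--     counts = deepcopy(grammar)
--     for key in counts.keys():
--         counts[key] = 0
--
--     #find the finishing kernel and update its counts
--     for idx,_ in enumerate(structure_string):
--         partial = structure_string[-idx-1:]
--         for start in allkernels:
--             if start in partial: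
--                 k = str(start)+'-'
--                 counts[k] = counts[k] + 1
--                 finished = True
--         if finished == True:
--             break
--
--     #find the starting kernel and update its counts
--     for idx,_ in enumerate(structure_string):
--         partial = structure_string[:idx+1]
--         for start in allkernels:
--             if start in partial:
--                 k = '+'+str(start)
--                 counts[k] = counts[k] + 1
--                 started = True
--         if started == True:
--             break
--
--     #count all the non-starting transitions til the terminal state
--     for key in counts.keys():
--         if key[1:] not in allkernels and key[:-1] not in allkernels:
--             #non-starting
--             counts[key] = counts[key] + sum(1 for i in range(len(structure_string)) if structure_string.startswith(key, i))
--
--     return {k:v for k,v in counts.items() if v!= 0.0}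
-- ===== SOURCE B (Python) =====
-- def _earliest_hits(text, pairs):
--     # labels of the patterns contained in the shortest nonempty prefix of text
--     # that contains any pattern (pairs = [(label, pattern), ...])
--     ends = [(lab, text.find(p) + len(p)) for lab, p in pairs if p in text]
--     if not ends:
--         return []
--     m = max(1, min(e for _, e in ends))
--     return [lab for lab, e in ends if e <= m]
--
--
-- def generate_transitions(structure_string, grammar, allkernels):
--     s = structure_string
--     n = len(s)
--     counts = {k: 0 for k in grammar}
--     if n:
--         # finishing kernels = starting kernels of the reversed string
--         for k in _earliest_hits(s[::-1], [(k, k[::-1]) for k in allkernels]):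
--             counts[k + '-'] = counts[k + '-'] + 1
--         for k in _earliest_hits(s, [(k, k) for k in allkernels]):
--             counts['+' + k] = counts['+' + k] + 1
--     for key in counts:
--         if key[1:] not in allkernels and key[:-1] not in allkernels:
--             c = 0
--             i = 0
--             while i < n:
--                 j = s.find(key, i)
--                 if j < 0:
--                     break
--                 c += 1
--                 i = j + 1
--             counts[key] = counts[key] + c
--     return {k: v for k, v in counts.items() if v != 0}
-- ===== Notes on version B (the rewrite author's own statement) =====
-- stated objective: faster
-- what changed: A scans growing suffix/prefix slices (O(n^2) slicing with a substring test in each) and counts occurrences with startswith at every position; B computes the minimal covering window in one pass from each kernel's first occurrence end via find (finishing kernels = starting kernels of the reversed string) and counts overlapping occurrences with a find-jump loop.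
import Mathlib
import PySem

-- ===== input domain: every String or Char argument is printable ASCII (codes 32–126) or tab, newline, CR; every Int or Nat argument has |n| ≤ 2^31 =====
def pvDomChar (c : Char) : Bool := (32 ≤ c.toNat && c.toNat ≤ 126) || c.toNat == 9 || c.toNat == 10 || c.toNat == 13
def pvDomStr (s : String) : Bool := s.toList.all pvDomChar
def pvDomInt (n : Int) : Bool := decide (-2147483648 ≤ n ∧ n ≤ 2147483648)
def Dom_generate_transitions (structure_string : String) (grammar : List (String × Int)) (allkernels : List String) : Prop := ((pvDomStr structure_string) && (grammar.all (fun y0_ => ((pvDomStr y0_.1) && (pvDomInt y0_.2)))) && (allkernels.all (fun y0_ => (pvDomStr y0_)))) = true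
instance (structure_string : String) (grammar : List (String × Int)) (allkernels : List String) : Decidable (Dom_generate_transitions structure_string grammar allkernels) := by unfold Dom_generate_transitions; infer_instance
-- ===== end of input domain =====

-- B replaces A's O(n^2) growing-slice scans by single find-based searches (finishing = starting
-- on the reversed string) and A's position-by-position startswith sum by a find-jump loop (objective: faster).

-- ===== PORT A =====
-- A's two window loops have identical shape (window slice + inner kernel scan + break);
-- gtA_scan / gtA_loop transcribe that shape once, instantiated with each loop's slice and key decoration.
-- 'counts[k] = counts[k] + 1' is ported with getD 0: total; Pre_ guarantees the key is present wherever this runs.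
def gtA_scan (window : String) (deco : String → String) (kernels : List String)
    (st : PySem.Dict String Int × Bool) : PySem.Dict String Int × Bool :=
  kernels.foldl (fun acc start =>
    if PySem.Str.isIn start window then
      ((acc.1.insert (deco start) (acc.1.getD (deco start) 0 + 1)), true)
    else acc) st

def gtA_loop (window : Int → String) (deco : String → String) (kernels : List String) :
    List (Int × Char) → (PySem.Dict String Int × Bool) → (PySem.Dict String Int × Bool)
  | [], st => st
  | (idx, _) :: rest, st =>
    let st' := gtA_scan (window idx) deco kernels st
    if st'.2 = true then st' else gtA_loop window deco kernels rest st'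

-- sum(1 for i in range(len(s)) if s.startswith(key, i)); s.startswith(key, i) for
-- 0 ≤ i < len(s) is exactly 'key is a prefix of s[i:]', ported as Chars.startswith on the dropped list.
def gtA_count (s : String) (key : String) : Int :=
  (PySem.List.pyRange 0 (PySem.Str.len s)).foldl
    (fun acc i =>
      if PySem.Chars.startswith (s.toList.drop i.toNat) key.toList then acc + 1 else acc) 0

def generate_transitions (structure_string : String) (grammar : List (String × Int)) (allkernels : List String) : List (String × Int) :=
  let counts0 := PySem.Dict.ofList grammar   -- counts = deepcopy(grammar)
  let counts := counts0.keys.foldl (fun c key => c.insert key (0 : Int)) counts0   -- for key in counts.keys(): counts[key] = 0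
  let st1 := gtA_loop (fun idx => PySem.Str.slice structure_string (some (-idx - 1)) none)
      (fun start => start ++ "-") allkernels (PySem.List.enumerate structure_string.toList) (counts, false)
  let st2 := gtA_loop (fun idx => PySem.Str.slice structure_string none (some (idx + 1)))
      (fun start => "+" ++ start) allkernels (PySem.List.enumerate structure_string.toList) (st1.1, false)
  let c3 := st2.1.keys.foldl (fun c key =>
      if !(allkernels.contains (PySem.Str.slice key (some 1) none)) &&
         !(allkernels.contains (PySem.Str.slice key none (some (-1)))) then
        c.insert key (c.getD key 0 + gtA_count structure_string key)
      else c) st2.1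
  (PySem.Dict.ofList (c3.items.filter (fun p => decide (p.2 ≠ 0)))).items

-- ===== PORT B =====
-- _earliest_hits(text, pairs) from Source B
def gtB_hits (text : String) (pairs : List (String × String)) : List String :=
  let ends := (pairs.filter (fun lp => PySem.Str.isIn lp.2 text)).map
      (fun lp => (lp.1, PySem.Str.find text lp.2 + PySem.Str.len lp.2))
  if ends.isEmpty then []
  else
    -- min(e for _, e in ends): ends is nonempty here, so min? is some
    let m : Int := max 1 ((PySem.List.min? (ends.map (fun p => p.2)) (fun e => e)).getD 0)
    (ends.filter (fun p => decide (p.2 ≤ m))).map (fun p => p.1)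

-- s[::-1] (slice? with step -1 is always some)
def gtB_rev (s : String) : String := (PySem.Str.slice? s none none (-1)).getD ""

-- the 'while i < n: j = s.find(key, i); if j < 0: break; c += 1; i = j + 1' loop, as the
-- count it produces from position i on (n = len(s))
def gtB_countOcc (s key : List Char) (i : Nat) : Int :=
  if h : i < s.length then
    let j := PySem.Chars.findFrom s key (i : Int)
    if hj : j < 0 then 0
    else 1 + gtB_countOcc s key (j.toNat + 1)
  else 0
termination_by s.length - i
decreasing_by
  have hne : PySem.Chars.findFrom s key (i : Int) ≠ -1 := by
    intro hc
    apply hj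
    show PySem.Chars.findFrom s key (i : Int) < 0
    omega
  have hspec := PySem.Chars.findFrom_natCast_spec s key i (Nat.le_of_lt h) hne
  have : (i : Int) ≤ PySem.Chars.findFrom s key (i : Int) := hspec.1
  omega

def generate_transitions_alt (structure_string : String) (grammar : List (String × Int)) (allkernels : List String) : List (String × Int) :=
  let s := structure_string
  let n : Int := PySem.Str.len s
  let counts := PySem.Dict.ofList (grammar.map (fun p => (p.1, (0 : Int))))   -- {k: 0 for k in grammar}
  let counts1 :=
    if n ≠ 0 then
      let cf := (gtB_hits (gtB_rev s) (allkernels.map (fun k => (k, gtB_rev k)))).foldl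
          (fun c k => c.insert (k ++ "-") (c.getD (k ++ "-") 0 + 1)) counts
      (gtB_hits s (allkernels.map (fun k => (k, k)))).foldl
          (fun c k => c.insert ("+" ++ k) (c.getD ("+" ++ k) 0 + 1)) cf
    else counts
  let c3 := counts1.keys.foldl (fun c key =>
      if !(allkernels.contains (PySem.Str.slice key (some 1) none)) &&
         !(allkernels.contains (PySem.Str.slice key none (some (-1)))) then
        c.insert key (c.getD key 0 + gtB_countOcc s.toList key.toList 0)
      else c) counts1
  (PySem.Dict.ofList (c3.items.filter (fun p => decide (p.2 ≠ 0)))).items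

-- ===== PRECONDITION & SPEC =====
-- gtPreEnd t p = position just after the first occurrence of p in t (find + len);
-- gtPreMinHit holds iff p = f k occurs in t and does so inside the FIRST window of t
-- (prefix of length idx+1) that contains any kernel, i.e. its end is ≤ max(1, the minimal end):
-- end ≤ 1, or end is minimal among the ends of all occurring kernels.
def gtPreEnd (t p : List Char) : Int := PySem.Chars.find t p + p.length

def gtPreMinHit (t : List Char) (ks : List String) (f : String → List Char) (k : String) : Prop :=
  0 ≤ PySem.Chars.find t (f k) ∧
    (gtPreEnd t (f k) ≤ 1 ∨
      ∀ k' ∈ ks, 0 ≤ PySem.Chars.find t (f k') → gtPreEnd t (f k) ≤ gtPreEnd t (f k'))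

-- Pre_ excludes exactly the inputs on which A raises KeyError: the structure string is nonempty and
-- some kernel matched inside the first firing suffix window lacks its 'k-' key in grammar, or some
-- kernel matched inside the first firing prefix window lacks its '+k' key (A looks those keys up and
-- raises; B raises there too). On every other input A returns normally.
def Pre_generate_transitions (structure_string : String) (grammar : List (String × Int)) (allkernels : List String) : Prop :=
  structure_string.toList ≠ [] →
    ∀ k ∈ allkernels,
      (gtPreMinHit structure_string.toList.reverse allkernels (fun k' => k'.toList.reverse) k →
        (k ++ "-") ∈ grammar.map Prod.fst) ∧
      (gtPreMinHit structure_string.toList allkernels (fun k' => k'.toList) k →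
        ("+" ++ k) ∈ grammar.map Prod.fst)

instance (structure_string : String) (grammar : List (String × Int)) (allkernels : List String) : Decidable (Pre_generate_transitions structure_string grammar allkernels) := by
  unfold Pre_generate_transitions gtPreMinHit gtPreEnd; infer_instance

def pvWitness_generate_transitions : String × (List (String × Int)) × List String :=
  ("abba", [("+a", 2), ("a-", 1), ("+b", 3), ("b-", 4), ("ab", 7)], ["a", "b"])

def Spec_generate_transitions (structure_string : String) (grammar : List (String × Int)) (allkernels : List String) (out : List (String × Int)) : Prop := out = generate_transitions_alt structure_string grammar allkernels
instance (structure_string : String) (grammar : List (String × Int)) (allkernels : List String) (out : List (String × Int)) : Decidable (Spec_generate_transitions structure_string grammar allkernels out) := by unfold Spec_generate_transitions; infer_instance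

-- ===== CLAIM (what is proved, stated in full; the proofs are below) =====
def Claim_equal_generate_transitions : Prop := ∀ (structure_string : String) (grammar : List (String × Int)) (allkernels : List String), Dom_generate_transitions structure_string grammar allkernels → Pre_generate_transitions structure_string grammar allkernels → Spec_generate_transitions structure_string grammar allkernels (generate_transitions structure_string grammar allkernels)

-- ===== LEMMAS AND PROOFS =====

-- occurrence count from position i on, as a countP over the index interval [i, len s)
def gtCnt (s key : List Char) (i : Nat) : Int :=
  ((List.range' i (s.length - i)).countP (fun p => PySem.Chars.startswith (s.drop p) key) : Int)

theorem gtCnt_stop (s key : List Char) (i : Nat) (h : s.length ≤ i) : gtCnt s key i = 0 := by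
  simp [gtCnt, Nat.sub_eq_zero_of_le h]

theorem gtCnt_skip (s key : List Char) (i j : Nat) (hij : i ≤ j) (hj : j ≤ s.length)
    (h : ∀ p, i ≤ p → p < j → ¬ key <+: s.drop p) : gtCnt s key i = gtCnt s key j := by
  unfold gtCnt
  have hsplit : List.range' i (j - i) ++ List.range' j (s.length - j) = List.range' i (s.length - i) := by
    have := List.range'_append (s := i) (m := j - i) (n := s.length - j) (step := 1)
    rw [Nat.one_mul] at this
    rw [show i + (j - i) = j by omega] at this
    rw [show j - i + (s.length - j) = s.length - i by omega] at this
    exact this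
  rw [← hsplit, List.countP_append]
  have hzero : (List.range' i (j - i)).countP (fun p => PySem.Chars.startswith (s.drop p) key) = 0 := by
    rw [List.countP_eq_zero]
    intro p hp
    rw [List.mem_range'_1] at hp
    simp only [PySem.Chars.startswith_iff]
    exact fun hpre => h p hp.1 (by omega) hpre
  rw [hzero]
  simp

theorem gtCnt_hit (s key : List Char) (j : Nat) (hj : j < s.length) (h : key <+: s.drop j) :
    gtCnt s key j = 1 + gtCnt s key (j + 1) := by
  unfold gtCnt
  rw [show s.length - j = (s.length - (j + 1)) + 1 by omega, List.range'_succ, List.countP_cons]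
  have : PySem.Chars.startswith (s.drop j) key = true := (PySem.Chars.startswith_iff _ _).2 h
  simp [this]
  omega

theorem gtB_countOcc_eq_gtCnt (s key : List Char) : ∀ i, gtB_countOcc s key i = gtCnt s key i := by
  have main : ∀ (m : Nat) (i : Nat), s.length - i = m → gtB_countOcc s key i = gtCnt s key i := by
    intro m
    induction m using Nat.strong_induction_on with
    | _ m ih =>
      intro i hm
      rw [gtB_countOcc]
      by_cases h : i < s.length
      · rw [dif_pos h]
        by_cases hj : PySem.Chars.findFrom s key (i : Int) < 0
        · rw [dif_pos hj]
          -- j < 0: no occurrence at any p ≥ i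
          have hnone : ∀ p, i ≤ p → p < s.length → ¬ key <+: s.drop p := by
            intro p hip hp hpre
            have hinf : key <:+: s.drop i := by
              rw [List.infix_iff_prefix_suffix]
              refine ⟨s.drop p, ?_, ?_⟩
              · exact hpre
              · have : s.drop p = (s.drop i).drop (p - i) := by
                  rw [List.drop_drop]; congr 1; omega
                rw [this]
                exact List.drop_suffix _ _
            by_cases hone : PySem.Chars.findFrom s key (i : Int) = -1
            · exact (PySem.Chars.findFrom_natCast_eq_neg_one_iff s key i (Nat.le_of_lt h)).1 hone hinf
            · have hspec := PySem.Chars.findFrom_natCast_spec s key i (Nat.le_of_lt h) hone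
              omega
          rw [gtCnt_skip s key i s.length (Nat.le_of_lt h) le_rfl hnone, gtCnt_stop s key _ le_rfl]
        · rw [dif_neg hj]
          have hone : PySem.Chars.findFrom s key (i : Int) ≠ -1 := by
            intro hc; rw [hc] at hj; exact hj (by decide)
          have hspec := PySem.Chars.findFrom_natCast_spec s key i (Nat.le_of_lt h) hone
          set j := PySem.Chars.findFrom s key (i : Int) with hjdef
          have hij : (i : Int) ≤ j := hspec.1
          have hj0 : 0 ≤ j := le_trans (by omega) hij
          have hjn : j.toNat < s.length := by
            by_contra hge
            have hdrop : s.drop j.toNat = [] := List.drop_eq_nil_of_le (by omega)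
            have hkey : key = [] := by
              have := hspec.2.1
              rw [hdrop] at this
              exact List.prefix_nil.1 this
            have : ¬ key <+: s.drop i := hspec.2.2 i le_rfl (by omega)
            exact this (by simp [hkey])
          have hskip : gtCnt s key i = gtCnt s key j.toNat :=
            gtCnt_skip s key i j.toNat (by omega) (by omega) (fun p hip hpj => hspec.2.2 p hip hpj)
          have hhit : gtCnt s key j.toNat = 1 + gtCnt s key (j.toNat + 1) :=
            gtCnt_hit s key j.toNat hjn hspec.2.1
          rw [hskip, hhit, ih (s.length - (j.toNat + 1)) (by omega) (j.toNat + 1) rfl]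
      · rw [dif_neg h, gtCnt_stop s key i (by omega)]
  intro i
  exact main (s.length - i) i rfl

theorem gtA_count_eq (s key : String) :
    gtA_count s key = gtB_countOcc s.toList key.toList 0 := by
  rw [gtB_countOcc_eq_gtCnt]
  unfold gtA_count gtCnt
  rw [PySem.Str.len_eq, PySem.List.pyRange_zero_natCast, List.foldl_map, PySem.List.foldl_if_add_one]
  simp [List.range_eq_range']

theorem gt_dict_ext (d e : PySem.Dict String Int) (h : d.items = e.items) : d = e := by
  cases d; cases e; simpa using h

theorem gt_keys_insert (d : PySem.Dict String Int) (k : String) (v : Int) :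
    (d.insert k v).keys = if d.contains k then d.keys else d.keys ++ [k] := by
  simp only [PySem.Dict.keys, PySem.Dict.items_insert]
  split
  · rw [List.map_map]
    congr 1
    funext p
    simp only [Function.comp_apply]
    split
    · next hbe => simp [(eq_of_beq hbe).symm]
    · rfl
  · simp

theorem gt_get?_pairs_fold (l : List (String × Int)) (d : PySem.Dict String Int) (k : String) :
    ((l.map (fun p => (p.1, (0 : Int)))).foldl (fun acc p => acc.insert p.1 p.2) d).get? k
      = if k ∈ l.map Prod.fst then some 0 else d.get? k := by
  induction l generalizing d with
  | nil => simp
  | cons p t ih =>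
    simp only [List.map_cons, List.foldl_cons, ih, PySem.Dict.get?_insert, List.mem_cons]
    by_cases h1 : k ∈ t.map Prod.fst <;> by_cases h2 : k = p.1 <;> simp [h1, h2]

theorem gt_get?_zero_fold (ks : List String) (d : PySem.Dict String Int) (k : String) :
    (ks.foldl (fun c key => c.insert key (0 : Int)) d).get? k
      = if k ∈ ks then some 0 else d.get? k := by
  induction ks generalizing d with
  | nil => simp
  | cons x t ih =>
    simp only [List.foldl_cons, ih, PySem.Dict.get?_insert, List.mem_cons]
    by_cases h1 : k ∈ t <;> by_cases h2 : k = x <;> simp [h1, h2]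

theorem gt_keys_pairs_fold (l : List (String × Int)) (d : PySem.Dict String Int) :
    (l.foldl (fun acc p => acc.insert p.1 p.2) d).keys = PySem.Set.update d.keys (l.map Prod.fst) := by
  induction l generalizing d with
  | nil => simp [PySem.Set.update]
  | cons p t ih =>
    simp only [List.foldl_cons, ih, List.map_cons, PySem.Set.update, PySem.Set.add]
    congr 1
    rw [gt_keys_insert]
    have : PySem.Dict.contains d p.1 = PySem.Set.contains d.keys p.1 := by
      rw [PySem.Dict.contains_eq_decide_mem_keys]
      simp [PySem.Set.contains]
    rw [this]

theorem gt_set_update_self (s : List String) (l : List String) (h : ∀ x ∈ l, x ∈ s) :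
    PySem.Set.update s l = s := by
  induction l with
  | nil => rfl
  | cons x t ih =>
    simp only [PySem.Set.update, List.foldl_cons]
    have hx : PySem.Set.add s x = s := by
      simp only [PySem.Set.add]
      rw [if_pos]
      simp only [PySem.Set.contains, List.contains_iff_mem]
      exact h x (by simp)
    rw [hx]
    exact ih (fun y hy => h y (by simp [hy]))

theorem gt_init_eq (g : List (String × Int)) :
    (PySem.Dict.ofList g).keys.foldl (fun c key => c.insert key (0 : Int)) (PySem.Dict.ofList g)
      = PySem.Dict.ofList (g.map (fun p => (p.1, (0 : Int)))) := by
  have hofl : ∀ (l : List (String × Int)), PySem.Dict.ofList l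
      = l.foldl (fun acc p => acc.insert p.1 p.2) PySem.Dict.empty := by
    intro l; rfl
  have hkeysR : (PySem.Dict.ofList (g.map (fun p => (p.1, (0 : Int))))).keys
      = (PySem.Dict.ofList g).keys := by
    rw [hofl, hofl, gt_keys_pairs_fold, gt_keys_pairs_fold]
    simp [List.map_map, Function.comp_def]
  have hkeysL : ((PySem.Dict.ofList g).keys.foldl (fun c key => c.insert key (0 : Int))
      (PySem.Dict.ofList g)).keys = (PySem.Dict.ofList g).keys := by
    have := PySem.Dict.keys_foldl_insert (PySem.Dict.ofList g).keys
      (fun (_ : PySem.Dict String Int) (_ : String) => (0 : Int)) (PySem.Dict.ofList g)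
    rw [this]
    exact gt_set_update_self _ _ (fun x hx => hx)
  apply gt_dict_ext
  rw [PySem.Dict.items_eq_map_keys _ (by rw [hkeysL]; exact PySem.Dict.nodup_keys_ofList g) 0,
      PySem.Dict.items_eq_map_keys _ (by rw [hkeysR]; exact PySem.Dict.nodup_keys_ofList g) 0]
  rw [hkeysL, hkeysR]
  apply List.map_congr_left
  intro k hk
  have h1 : ((PySem.Dict.ofList g).keys.foldl (fun c key => c.insert key (0 : Int))
      (PySem.Dict.ofList g)).getD k 0 = 0 := by
    simp only [PySem.Dict.getD, gt_get?_zero_fold, if_pos hk]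
    rfl
  have hkmem : k ∈ g.map Prod.fst := by
    have := hk
    rw [hofl, gt_keys_pairs_fold] at this
    have hempty : (PySem.Dict.empty : PySem.Dict String Int).keys = [] := by rfl
    rw [hempty] at this
    exact (PySem.Set.mem_ofList _ _).1 this
  have h2 : (PySem.Dict.ofList (g.map (fun p => (p.1, (0 : Int))))).getD k 0 = 0 := by
    rw [hofl]
    simp only [PySem.Dict.getD, gt_get?_pairs_fold, if_pos hkmem]
    rfl
  rw [h1, h2]

-- 'p occurs in the first L characters of t' expressed through find: the first occurrence ends by L
theorem gt_infix_take_iff (t p : List Char) (L : Nat) :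
    p <:+: t.take L ↔ 0 ≤ PySem.Chars.find t p ∧ PySem.Chars.find t p + p.length ≤ (L : Int) := by
  constructor
  · intro h
    have hinf : p <:+: t := h.trans (List.take_prefix L t).isInfix
    have h0 : 0 ≤ PySem.Chars.find t p := (PySem.Chars.find_nonneg_iff t p).2 hinf
    refine ⟨h0, ?_⟩
    obtain ⟨u, v, huv⟩ := h
    have hjp : p <+: (t.take L).drop u.length := by
      rw [← huv]
      simp
    have hlen : u.length + p.length ≤ L := by
      have : (u ++ p ++ v).length = (t.take L).length := by rw [huv]
      have h2 : (t.take L).length ≤ L := by simp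
      simp only [List.length_append] at this
      omega
    have hdropt : p <+: t.drop u.length := by
      rw [List.drop_take] at hjp
      exact ((List.prefix_take_iff).1 hjp).1
    have hmin := (PySem.Chars.find_spec h0).2
    have hle : (PySem.Chars.find t p).toNat ≤ u.length := by
      by_contra hc
      exact hmin u.length (by omega) hdropt
    omega
  · rintro ⟨h0, hL⟩
    have hspec := (PySem.Chars.find_spec h0).1
    set j := (PySem.Chars.find t p).toNat with hj
    have hjL : j + p.length ≤ L := by omega
    have hpre : p <+: (t.take L).drop j := by
      rw [List.drop_take]
      rw [List.prefix_take_iff]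
      exact ⟨hspec, by omega⟩
    rw [List.infix_iff_prefix_suffix]
    exact ⟨(t.take L).drop j, hpre, List.drop_suffix _ _⟩

theorem gt_end_le_len (t p : List Char) (h : 0 ≤ PySem.Chars.find t p) :
    PySem.Chars.find t p + p.length ≤ (t.length : Int) := by
  have hp := (PySem.Chars.find_spec h).1.length_le
  rw [List.length_drop] at hp
  have hfl := PySem.Chars.find_le_length t p
  omega

-- the per-window kernel scan, as a filtered increment pass plus a hit flag
def gtInc (c : PySem.Dict String Int) (k : String) : PySem.Dict String Int :=
  c.insert k (c.getD k 0 + 1)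

theorem gt_scan_eq (w : String) (deco : String → String) (ks : List String)
    (c : PySem.Dict String Int) (b : Bool) :
    gtA_scan w deco ks (c, b) =
      (((ks.filter (fun k => PySem.Str.isIn k w)).map deco).foldl gtInc c,
        b || ks.any (fun k => PySem.Str.isIn k w)) := by
  induction ks generalizing c b with
  | nil => simp [gtA_scan]
  | cons k t ih =>
    simp only [gtA_scan, List.foldl_cons] at *
    cases hk : PySem.Str.isIn k w
    · simp only [hk, List.filter_cons, List.any_cons]
      rw [if_neg (by simp), ih]
      simp
    · simp only [hk, if_pos, List.filter_cons, List.any_cons]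
      rw [ih]
      simp [gtInc]

theorem gt_enum_nil (a : Int) : PySem.List.enumerate ([] : List Char) a = [] := by
  simp [PySem.List.enumerate]

theorem gt_enum_cons (a : Int) (x : Char) (t : List Char) :
    PySem.List.enumerate (x :: t) a = (a, x) :: PySem.List.enumerate t (a + 1) := by
  simp [PySem.List.enumerate]

theorem gt_loopA_none (window : Int → String) (deco : String → String) (ks : List String)
    (xs : List Char) : ∀ (a : Int) (c : PySem.Dict String Int),
    (∀ i : Nat, i < xs.length → ks.any (fun k => PySem.Str.isIn k (window (a + i))) = false) →
    gtA_loop window deco ks (PySem.List.enumerate xs a) (c, false) = (c, false) := by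
  induction xs with
  | nil => intro a c _; rw [gt_enum_nil]; rfl
  | cons x t ih =>
    intro a c h
    rw [gt_enum_cons]
    simp only [gtA_loop]
    have h0 : ks.any (fun k => PySem.Str.isIn k (window a)) = false := by
      have := h 0 (by simp)
      simpa using this
    rw [gt_scan_eq]
    have hfil : ks.filter (fun k => PySem.Str.isIn k (window a)) = [] := by
      rw [List.filter_eq_nil_iff]
      intro k hk
      rw [List.any_eq_false] at h0
      exact h0 k hk
    rw [hfil]
    simp only [List.map_nil, List.foldl_nil, h0, Bool.or_false]
    rw [if_neg (by simp)]
    apply ih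
    intro i hi
    have := h (i + 1) (by simpa using Nat.succ_lt_succ hi)
    rw [show a + 1 + (i : Int) = a + ((i : Nat) + 1 : Nat) by push_cast; ring]
    exact this

theorem gt_loopA_first (window : Int → String) (deco : String → String) (ks : List String)
    (xs : List Char) : ∀ (a : Int) (c : PySem.Dict String Int) (i0 : Nat),
    i0 < xs.length →
    ks.any (fun k => PySem.Str.isIn k (window (a + i0))) = true →
    (∀ i : Nat, i < i0 → ks.any (fun k => PySem.Str.isIn k (window (a + i))) = false) →
    gtA_loop window deco ks (PySem.List.enumerate xs a) (c, false) =
      (((ks.filter (fun k => PySem.Str.isIn k (window (a + i0)))).map deco).foldl gtInc c, true) := by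
  induction xs with
  | nil => intro a c i0 h; simp at h
  | cons x t ih =>
    intro a c i0 hlt hhit hmin
    rw [gt_enum_cons]
    simp only [gtA_loop]
    rw [gt_scan_eq]
    cases i0 with
    | zero =>
      have h0 : ks.any (fun k => PySem.Str.isIn k (window a)) = true := by simpa using hhit
      simp only [Bool.false_or, h0]
      rw [if_pos trivial]
      simp
    | succ i0' =>
      have h0 : ks.any (fun k => PySem.Str.isIn k (window a)) = false := by
        have := hmin 0 (Nat.succ_pos _)
        simpa using this
      have hfil : ks.filter (fun k => PySem.Str.isIn k (window a)) = [] := by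
        rw [List.filter_eq_nil_iff]
        intro k hk
        rw [List.any_eq_false] at h0
        exact h0 k hk
      rw [hfil]
      simp only [List.map_nil, List.foldl_nil, h0, Bool.or_false]
      rw [if_neg (by simp)]
      have harg : a + 1 + (i0' : Int) = a + ((i0' + 1 : Nat) : Int) := by push_cast; ring
      have := ih (a + 1) c i0' (by simpa using Nat.lt_of_succ_lt_succ hlt)
        (by rw [harg]; exact hhit)
        (fun i hi => by
          rw [show a + 1 + (i : Int) = a + ((i : Nat) + 1 : Nat) by push_cast; ring]
          exact hmin (i + 1) (Nat.succ_lt_succ hi))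
      rw [harg] at this
      exact this

-- one window loop of A equals one _earliest_hits pass of B, for any window family that
-- tests containment in the first i+1 characters of B's search text
theorem gt_loop_bridge (s t : String) (g : String → String) (window : Int → String)
    (deco : String → String) (ks : List String) (c : PySem.Dict String Int)
    (hne : s.toList ≠ [])
    (hlen : t.toList.length = s.toList.length)
    (hwin : ∀ (i : Nat) (k : String), i < s.toList.length →
        (PySem.Str.isIn k (window (i : Int)) = true ↔ (g k).toList <:+: t.toList.take (i + 1))) :
    (gtA_loop window deco ks (PySem.List.enumerate s.toList) (c, false)).1 =
      (gtB_hits t (ks.map (fun k => (k, g k)))).foldl (fun c k => gtInc c (deco k)) c := by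
  have hn0 : 0 < s.toList.length := List.length_pos_of_ne_nil hne
  set n := s.toList.length with hn
  set q : String → Bool := fun k => PySem.Str.isIn (g k) t with hq
  set endk : String → Int := fun k => PySem.Str.find t (g k) + PySem.Str.len (g k) with hendk
  have hq_iff : ∀ k : String, q k = true ↔ 0 ≤ PySem.Chars.find t.toList (g k).toList := by
    intro k
    rw [hq]
    rw [PySem.Str.isIn_iff_infix, ← PySem.Chars.find_nonneg_iff]
  have hendk_eq : ∀ k : String,
      endk k = PySem.Chars.find t.toList (g k).toList + ((g k).toList.length : Int) := by
    intro k
    rw [hendk]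
    simp [PySem.Str.find_eq, PySem.Str.len_eq]
  -- unfold B's helper
  have hfil : ((ks.map (fun k => (k, g k))).filter (fun lp => PySem.Str.isIn lp.2 t))
      = (ks.filter q).map (fun k => (k, g k)) := by
    rw [List.filter_map]
    rfl
  have hends : (((ks.map (fun k => (k, g k))).filter (fun lp => PySem.Str.isIn lp.2 t)).map
        (fun lp => (lp.1, PySem.Str.find t lp.2 + PySem.Str.len lp.2)))
      = (ks.filter q).map (fun k => (k, endk k)) := by
    rw [hfil, List.map_map]
    rfl
  by_cases hqnil : ks.filter q = []
  · -- no pattern occurs in t at all: A's loop never fires, B returns no hits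
    have hB : gtB_hits t (ks.map (fun k => (k, g k))) = [] := by
      unfold gtB_hits
      rw [hends, hqnil]
      rfl
    rw [hB]
    have hA := gt_loopA_none window deco ks s.toList 0 c ?hnone
    · rw [hA]
      rfl
    case hnone =>
      intro i hi
      rw [List.any_eq_false]
      intro k hk hisin
      rw [show (0 : Int) + (i : Nat) = ((i : Nat) : Int) by ring] at hisin
      have hinf : (g k).toList <:+: t.toList.take (i + 1) := (hwin i k hi).1 hisin
      have hq_true : q k = true := by
        rw [hq_iff]
        rw [PySem.Chars.find_nonneg_iff]
        exact hinf.trans (List.take_prefix _ _).isInfix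
      have : k ∈ ks.filter q := List.mem_filter.2 ⟨hk, hq_true⟩
      rw [hqnil] at this
      exact absurd this (List.not_mem_nil)
  · -- some pattern occurs: both sides act at the minimal covering window
    obtain ⟨m0, hm0⟩ : ∃ m0, PySem.List.min? (((ks.filter q).map (fun k => (k, endk k))).map
        (fun p => p.2)) (fun e => e) = some m0 := by
      cases hmin : PySem.List.min? (((ks.filter q).map (fun k => (k, endk k))).map
          (fun p => p.2)) (fun e => e) with
      | none =>
        rw [PySem.List.min?_eq_none_iff] at hmin
        simp only [List.map_eq_nil_iff] at hmin
        exact absurd hmin hqnil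
      | some m0 => exact ⟨m0, rfl⟩
  -- basic facts about m0
    have hmem_ends : ∀ k, k ∈ ks.filter q → endk k ∈ (((ks.filter q).map (fun k => (k, endk k))).map
        (fun p => p.2)) := by
      intro k hk
      rw [List.map_map]
      exact List.mem_map.2 ⟨k, hk, rfl⟩
    obtain ⟨k0, hk0mem, hk0end⟩ : ∃ k0, k0 ∈ ks.filter q ∧ endk k0 = m0 := by
      have := PySem.List.min?_mem hm0
      rw [List.map_map] at this
      obtain ⟨k0, hk0, he⟩ := List.mem_map.1 this
      exact ⟨k0, hk0, he⟩
    have hend_nonneg : ∀ k, q k = true → 0 ≤ endk k := by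
      intro k hqk
      rw [hendk_eq]
      have := (hq_iff k).1 hqk
      have h2 : (0 : Int) ≤ ((g k).toList.length : Int) := by positivity
      omega
    have hend_le : ∀ k, q k = true → endk k ≤ (n : Int) := by
      intro k hqk
      rw [hendk_eq]
      have := gt_end_le_len t.toList (g k).toList ((hq_iff k).1 hqk)
      rw [hlen] at this
      exact this
    have hq_k0 : q k0 = true := (List.mem_filter.1 hk0mem).2
    have hm0_nonneg : 0 ≤ m0 := hk0end ▸ hend_nonneg k0 hq_k0
    have hm0_le : m0 ≤ (n : Int) := hk0end ▸ hend_le k0 hq_k0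
    set L0 : Int := max 1 m0 with hL0
    have hL0_ge1 : 1 ≤ L0 := le_max_left _ _
    have hL0_gem : m0 ≤ L0 := le_max_right _ _
    have hL0_le : L0 ≤ (n : Int) := by
      rcases max_cases 1 m0 with ⟨he, _⟩ | ⟨he, _⟩ <;> rw [hL0, he] <;> omega
    set i0 : Nat := L0.toNat - 1 with hi0
    have hL0toNat : ((L0.toNat : Int)) = L0 := Int.toNat_of_nonneg (by omega)
    have hi0cast : ((i0 : Nat) : Int) + 1 = L0 := by
      rw [hi0]
      omega
    have hi0lt : i0 < n := by omega
    -- the hit characterisation: window i fires iff the minimal end fits in i+1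
    have hchar : ∀ i : Nat, i < n →
        ((ks.any (fun k => PySem.Str.isIn k (window (i : Int)))) = true ↔ m0 ≤ (i : Int) + 1) := by
      intro i hi
      constructor
      · intro h
        obtain ⟨k, hk, hisin⟩ := List.any_eq_true.1 h
        have hinf := (hwin i k hi).1 hisin
        rw [gt_infix_take_iff] at hinf
        obtain ⟨hfind0, hend⟩ := hinf
        have hqk : q k = true := (hq_iff k).2 hfind0
        have hkmem : k ∈ ks.filter q := List.mem_filter.2 ⟨hk, hqk⟩
        have := PySem.List.min?_isMin hm0 (endk k) (hmem_ends k hkmem)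
        simp only at this
        rw [hendk_eq k] at this
        push_cast at hend ⊢
        omega
      · intro hle
        apply List.any_eq_true.2
        refine ⟨k0, (List.mem_filter.1 hk0mem).1, ?_⟩
        rw [hwin i k0 hi, gt_infix_take_iff]
        have hfind0 := (hq_iff k0).1 hq_k0
        refine ⟨hfind0, ?_⟩
        have : endk k0 ≤ (i : Int) + 1 := by omega
        rw [hendk_eq k0] at this
        push_cast
        omega
    -- A's loop stops exactly at window i0
    have hA := gt_loopA_first window deco ks s.toList 0 c i0 hi0lt ?hhit ?hmin
    case hhit =>
      rw [show (0 : Int) + (i0 : Nat) = ((i0 : Nat) : Int) by ring]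
      rw [hchar i0 hi0lt]
      omega
    case hmin =>
      intro i hi
      rw [show (0 : Int) + (i : Nat) = ((i : Nat) : Int) by ring]
      rw [← Bool.not_eq_true, hchar i (by omega)]
      rcases max_cases 1 m0 with ⟨he, hge⟩ | ⟨he, hge⟩ <;> rw [hL0, he] at hi0cast <;> omega
    rw [hA]
    -- B's hit list is the same filtered kernel list
    have hne' : ((ks.filter q).map (fun k => (k, endk k))).isEmpty = false := by
      rw [Bool.eq_false_iff]
      intro hemp
      rw [List.isEmpty_iff, List.map_eq_nil_iff] at hemp
      exact hqnil hemp
    have hB : gtB_hits t (ks.map (fun k => (k, g k)))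
        = ks.filter (fun k => PySem.Str.isIn k (window ((i0 : Nat) : Int))) := by
      simp only [gtB_hits]
      rw [hends, hne']
      simp only [Bool.false_eq_true, if_false, hm0, Option.getD_some]
      rw [List.filter_map, List.map_map]
      have : ((ks.filter q).filter ((fun p => decide (p.2 ≤ max 1 m0)) ∘ (fun k => (k, endk k))))
          = ks.filter (fun k => PySem.Str.isIn k (window ((i0 : Nat) : Int))) := by
        rw [List.filter_filter]
        apply List.filter_congr
        intro k hk
        rw [Bool.eq_iff_iff]
        simp only [Function.comp_apply, Bool.and_eq_true, decide_eq_true_eq]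
        rw [hwin i0 k hi0lt, gt_infix_take_iff, hq_iff]
        rw [hendk_eq k]
        constructor
        · rintro ⟨he, hf⟩
          refine ⟨by omega, by push_cast; omega⟩
        · rintro ⟨hf, he⟩
          push_cast at he
          refine ⟨by omega, by omega⟩
      rw [this]
      show List.map (fun k => k) _ = _
      exact List.map_id' _
    rw [hB, ← List.foldl_map (f := deco) (g := gtInc)]
    simp only [zero_add]

theorem gtB_rev_toList (x : String) : (gtB_rev x).toList = x.toList.reverse := by
  simp [gtB_rev, PySem.Str.slice?_none_none_neg_one]

theorem gt_fin_eq (s : String) (ks : List String) (c : PySem.Dict String Int)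
    (hne : s.toList ≠ []) :
    (gtA_loop (fun idx => PySem.Str.slice s (some (-idx - 1)) none) (fun start => start ++ "-") ks
        (PySem.List.enumerate s.toList) (c, false)).1
      = (gtB_hits (gtB_rev s) (ks.map (fun k => (k, gtB_rev k)))).foldl
          (fun c k => gtInc c (k ++ "-")) c := by
  apply gt_loop_bridge s (gtB_rev s) gtB_rev _ _ ks c hne
  · rw [gtB_rev_toList]; simp
  · intro i k hi
    have hslice : (PySem.Str.slice s (some (-(i : Int) - 1)) none).toList
        = s.toList.drop (s.toList.length - (i + 1)) := by
      rw [PySem.Str.toList_slice, PySem.Chars.slice_eq_listSlice]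
      rw [show (-(i : Int) - 1) = -(((i + 1 : Nat)) : Int) by push_cast; ring]
      exact PySem.List.slice_from_neg_natCast s.toList (i + 1) (by omega)
    rw [PySem.Str.isIn_eq, hslice, PySem.Chars.isIn_iff_infix, gtB_rev_toList, gtB_rev_toList]
    rw [show s.toList.reverse.take (i + 1) = (s.toList.drop (s.toList.length - (i + 1))).reverse from by
      rw [List.reverse_drop]; congr 1; omega]
    exact (List.reverse_infix).symm

theorem gt_start_eq (s : String) (ks : List String) (c : PySem.Dict String Int)
    (hne : s.toList ≠ []) :
    (gtA_loop (fun idx => PySem.Str.slice s none (some (idx + 1))) (fun start => "+" ++ start) ks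
        (PySem.List.enumerate s.toList) (c, false)).1
      = (gtB_hits s (ks.map (fun k => (k, k)))).foldl (fun c k => gtInc c ("+" ++ k)) c := by
  apply gt_loop_bridge s s (fun k => k) _ _ ks c hne rfl
  intro i k hi
  have hslice : (PySem.Str.slice s none (some ((i : Int) + 1))).toList = s.toList.take (i + 1) := by
    rw [PySem.Str.toList_slice, PySem.Chars.slice_eq_listSlice]
    rw [show ((i : Int) + 1) = (((i + 1 : Nat)) : Int) by push_cast; ring]
    exact PySem.List.slice_to_natCast s.toList (i + 1)
  rw [PySem.Str.isIn_eq, hslice, PySem.Chars.isIn_iff_infix]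

theorem gt_main_eq (s : String) (grammar : List (String × Int)) (ks : List String) :
    generate_transitions s grammar ks = generate_transitions_alt s grammar ks := by
  simp only [generate_transitions, generate_transitions_alt]
  rw [gt_init_eq]
  have hfun : (fun (c : PySem.Dict String Int) key =>
      if !(ks.contains (PySem.Str.slice key (some 1) none)) &&
         !(ks.contains (PySem.Str.slice key none (some (-1)))) then
        c.insert key (c.getD key 0 + gtA_count s key)
      else c)
      = (fun (c : PySem.Dict String Int) key =>
      if !(ks.contains (PySem.Str.slice key (some 1) none)) &&
         !(ks.contains (PySem.Str.slice key none (some (-1)))) then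
        c.insert key (c.getD key 0 + gtB_countOcc s.toList key.toList 0)
      else c) := by
    funext c key
    rw [gtA_count_eq]
  by_cases hs : s.toList = []
  · have hlen0 : PySem.Str.len s = 0 := by simp [PySem.Str.len_eq, hs]
    rw [hs, hlen0]
    simp only [gt_enum_nil, gtA_loop, ne_eq, not_true_eq_false, if_false]
    rw [← hs, hfun]
  · have hlen0 : PySem.Str.len s ≠ 0 := by
      rw [PySem.Str.len_eq]
      intro h
      apply hs
      have : s.toList.length = 0 := by exact_mod_cast h
      exact List.length_eq_zero_iff.1 this
    rw [if_pos hlen0]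
    rw [gt_fin_eq s ks _ hs, gt_start_eq s ks _ hs, hfun]
    simp only [gtInc]

-- ===== VERDICT (by name: the statement is the Claim_ definition above) =====
theorem generate_transitions_spec : Claim_equal_generate_transitions := by
  intro s g ks _ _
  unfold Spec_generate_transitions
  exact gt_main_eq s g ks
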